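-- pv_equiv track=rewrite | github.com/WyattLadner/Projects | CSC322ProgrammingAssignments/PA-4-Source.py | nonRecursiveStaircase
-- ===== SOURCE A (Python) =====
-- def nonRecursiveStaircase(n, steps):
--
--     iterative = [0] * (n+1)
--     iterative[0] = 1
--
--     for i in range (1, n+1):
--         for step in steps:
--             if i - step >= 0:
--                 iterative[i] += iterative[i - step]
--
--     paths = [[] for _ in range(n+1)]
--     paths[0] = [[]]
--
--     for i in range(1, n + 1):
--         for step in steps:
--             if i - step >= 0:
--                 for path in paths[i - step]:
--                     paths[i].append(path + [step])
--
--
--     return iterative[n], paths[n]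
-- ===== SOURCE B (Python) =====
-- def nonRecursiveStaircase(n, steps):
--     # Top-down recursion: waysTo(i) is the list of all paths summing to i;
--     # the count is just the length of the final path list.
--     def waysTo(i):
--         if i == 0:
--             return [[]]
--         return [p + [step] for step in steps if i - step >= 0 for p in waysTo(i - step)]
--     allPaths = waysTo(n)
--     return len(allPaths), allPaths
-- ===== Notes on version B (the rewrite author's own statement) =====
-- stated objective: simpler
-- what changed: Replaces A's two separate bottom-up DP table loops (one for counts, one for paths) with a single top-down recursion that builds the list of all paths directly and derives the count as its length.
-- outside the precondition, e.g. on nonRecursiveStaircase(1, [0]): A returns (0, []), B raises RecursionError; on nonRecursiveStaircase(2, [0, 1]): A returns (1, [[1, 1]]), B raises RecursionError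
import Mathlib
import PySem

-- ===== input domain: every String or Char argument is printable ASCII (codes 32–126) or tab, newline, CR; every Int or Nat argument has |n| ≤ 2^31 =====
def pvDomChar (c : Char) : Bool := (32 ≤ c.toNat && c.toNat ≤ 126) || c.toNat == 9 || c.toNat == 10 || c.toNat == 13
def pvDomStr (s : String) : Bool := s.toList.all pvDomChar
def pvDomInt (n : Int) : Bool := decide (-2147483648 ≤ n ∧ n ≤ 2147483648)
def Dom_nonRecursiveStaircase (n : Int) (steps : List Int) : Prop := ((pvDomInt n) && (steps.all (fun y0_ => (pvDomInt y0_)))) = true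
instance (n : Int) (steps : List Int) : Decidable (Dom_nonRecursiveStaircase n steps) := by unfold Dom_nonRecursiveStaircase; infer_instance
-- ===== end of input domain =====

-- B replaces A's two bottom-up DP table loops by a single top-down recursion over the target,
-- deriving the count as the length of the path list (objective: simpler).


-- ===== PORT A =====
-- Literal transliteration of A: two DP tables filled by for-loops over range(1, n+1).
-- Indices i and i-step are nonnegative and in range under Pre_, so pyGetD/pySetD are exact there.
def nonRecursiveStaircase (n : Int) (steps : List Int) : Int × List (List Int) :=
  let iterative : List Int := PySem.List.pySetD (List.replicate (n + 1).toNat (0 : Int)) 0 1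
  let iterative := (PySem.List.pyRange 1 (n + 1) 1).foldl (fun t i =>
      steps.foldl (fun t step =>
        if i - step ≥ 0 then
          PySem.List.pySetD t i (PySem.List.pyGetD t i 0 + PySem.List.pyGetD t (i - step) 0)
        else t) t) iterative
  let paths : List (List (List Int)) :=
    PySem.List.pySetD (List.replicate (n + 1).toNat ([] : List (List Int))) 0 [[]]
  let paths := (PySem.List.pyRange 1 (n + 1) 1).foldl (fun t i =>
      steps.foldl (fun t step =>
        if i - step ≥ 0 then
          PySem.List.pySetD t i (PySem.List.pyGetD t i [] ++
            (PySem.List.pyGetD t (i - step) []).map (fun path => path ++ [step]))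
        else t) t) paths
  (PySem.List.pyGetD iterative n 0, PySem.List.pyGetD paths n [])

-- ===== PORT B =====
-- Transliteration of Source B's waysTo; the fuel argument (= n.toNat) only makes the recursion
-- structurally terminating and is never exhausted when all steps are ≥ 1.
def altWaysTo (steps : List Int) (fuel : Nat) (i : Int) : List (List Int) :=
  if i = 0 then [[]]
  else match fuel with
    | 0 => []
    | f + 1 => steps.flatMap (fun step =>
        if i - step ≥ 0 then (altWaysTo steps f (i - step)).map (fun p => p ++ [step]) else [])

def nonRecursiveStaircase_alt (n : Int) (steps : List Int) : Int × List (List Int) :=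
  let allPaths := altWaysTo steps n.toNat n
  ((allPaths.length : Int), allPaths)

-- ===== PRECONDITION & SPEC =====
-- Pre_ excludes n < 0 and, for n ≥ 1, step lists containing a non-positive step: a negative step
-- makes A raise IndexError past the table end, and a zero step makes A either diverge (appending
-- to the list it is iterating) or return a degenerate value while B's recursion never terminates.
def Pre_nonRecursiveStaircase (n : Int) (steps : List Int) : Prop :=
  0 ≤ n ∧ (n = 0 ∨ ∀ s ∈ steps, 1 ≤ s)
instance (n : Int) (steps : List Int) : Decidable (Pre_nonRecursiveStaircase n steps) := by
  unfold Pre_nonRecursiveStaircase; infer_instance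

def pvWitness_nonRecursiveStaircase : Int × List Int := (3, [1, 2])

def Spec_nonRecursiveStaircase (n : Int) (steps : List Int) (out : Int × List (List Int)) : Prop :=
  out = nonRecursiveStaircase_alt n steps
instance (n : Int) (steps : List Int) (out : Int × List (List Int)) :
    Decidable (Spec_nonRecursiveStaircase n steps out) := by
  unfold Spec_nonRecursiveStaircase; infer_instance

-- ===== CLAIM (what is proved, stated in full; the proofs are below) =====
def Claim_equal_nonRecursiveStaircase : Prop := ∀ (n : Int) (steps : List Int),
  Dom_nonRecursiveStaircase n steps → Pre_nonRecursiveStaircase n steps →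
  Spec_nonRecursiveStaircase n steps (nonRecursiveStaircase n steps)

-- ===== LEMMAS AND PROOFS =====

lemma altWaysTo_zero (steps : List Int) (fuel : Nat) : altWaysTo steps fuel 0 = [[]] := by
  cases fuel <;> simp [altWaysTo]

-- The fuel is irrelevant as long as it dominates the (nonnegative) target.
lemma altWaysTo_fuel (steps : List Int) (hs : ∀ s ∈ steps, 1 ≤ s) :
    ∀ (f g : Nat) (i : Int), 0 ≤ i → i ≤ (f : Int) → i ≤ (g : Int) →
      altWaysTo steps f i = altWaysTo steps g i := by
  intro f
  induction f with
  | zero =>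
    intro g i h0 hf _
    have : i = 0 := le_antisymm (by exact_mod_cast hf) h0
    subst this
    simp [altWaysTo_zero]
  | succ f ih =>
    intro g i h0 hf hg
    by_cases hi : i = 0
    · subst hi; simp [altWaysTo_zero]
    · cases g with
      | zero => omega
      | succ g' =>
        simp only [altWaysTo, if_neg hi]
        refine List.flatMap_congr (fun s hsm => ?_)
        have h1 : 1 ≤ s := hs s hsm
        by_cases hc : i - s ≥ 0
        · rw [if_pos hc, if_pos hc, ih g' (i - s) (by omega) (by push_cast at *; omega) (by push_cast at *; omega)]
        · rw [if_neg hc, if_neg hc]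

-- One-step unfolding at a fixed dominating fuel F, for 1 ≤ i ≤ F.
lemma altWaysTo_unfold (steps : List Int) (hs : ∀ s ∈ steps, 1 ≤ s) (F : Nat) (i : Int)
    (h1 : 1 ≤ i) (hF : i ≤ (F : Int)) :
    altWaysTo steps F i = steps.flatMap (fun s =>
      if i - s ≥ 0 then (altWaysTo steps F (i - s)).map (fun p => p ++ [s]) else []) := by
  cases F with
  | zero => omega
  | succ f =>
    conv_lhs => rw [altWaysTo]
    rw [if_neg (by omega)]
    refine List.flatMap_congr (fun s hsm => ?_)
    have hstep : 1 ≤ s := hs s hsm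
    by_cases hc : i - s ≥ 0
    · rw [if_pos hc, if_pos hc,
        altWaysTo_fuel steps hs f (f + 1) (i - s) (by omega) (by push_cast at *; omega) (by push_cast at *; omega)]
    · rw [if_neg hc, if_neg hc]

lemma getD_set_ne' {α : Type} (t : List α) (i j : Nat) (v d : α) (h : j ≠ i) :
    (t.set i v).getD j d = t.getD j d := by
  simp [List.getD, List.getElem?_set_ne (by omega : i ≠ j)]

lemma getD_set_self' {α : Type} (t : List α) (i : Nat) (v d : α) (h : i < t.length) :
    (t.set i v).getD i d = v := by
  simp [List.getD, h]

-- A's inner loop over steps writes only index i and reads indices i-s < i of the ORIGINAL table.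
lemma inner_fold_generic {α : Type} (op : α → α → Int → α) (d : α) (i : Nat) :
    ∀ (l : List Int) (t : List α), (∀ s ∈ l, 1 ≤ s) → i < t.length →
    l.foldl (fun t s =>
        if (i : Int) - s ≥ 0 then
          PySem.List.pySetD t (i : Int) (op (PySem.List.pyGetD t (i : Int) d)
            (PySem.List.pyGetD t ((i : Int) - s) d) s)
        else t) t
    = t.set i (l.foldl (fun a s =>
        if (i : Int) - s ≥ 0 then op a (PySem.List.pyGetD t ((i : Int) - s) d) s else a)
        (t.getD i d)) := by
  intro l
  induction l with
  | nil =>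
    intro t _ ht
    simp [List.set_getElem_self, ht]
  | cons s l ih =>
    intro t hs ht
    simp only [List.foldl_cons]
    by_cases hc : (i : Int) - s ≥ 0
    · rw [if_pos hc, if_pos hc]
      set v := op (PySem.List.pyGetD t (i : Int) d) (PySem.List.pyGetD t ((i : Int) - s) d) s with hv
      have hset : PySem.List.pySetD t (i : Int) v = t.set i v := by simp
      rw [hset, ih (t.set i v) (fun x hx => hs x (by simp [hx])) (by simpa using ht)]
      rw [List.set_set]
      have hread : ∀ x : Int, 1 ≤ x → (i : Int) - x ≥ 0 →
          PySem.List.pyGetD (t.set i v) ((i : Int) - x) d = PySem.List.pyGetD t ((i : Int) - x) d := by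
        intro x hx hcx
        have hk : (i : Int) - x = ((i - x.toNat : Nat) : Int) := by omega
        rw [hk, PySem.List.pyGetD_natCast, PySem.List.pyGetD_natCast]
        exact getD_set_ne' t i (i - x.toNat) v d (by omega)
      rw [getD_set_self' t i v d ht]
      congr 1
      rw [show op (t.getD i d) (PySem.List.pyGetD t ((i : Int) - s) d) s = v from by
        rw [hv, PySem.List.pyGetD_natCast]]
      refine PySem.List.foldl_congr_mem l _ _ _ (fun a x hx => ?_)
      by_cases hcx : (i : Int) - x ≥ 0
      · rw [if_pos hcx, if_pos hcx, hread x (hs x (by simp [hx])) hcx]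
      · rw [if_neg hcx, if_neg hcx]
    · rw [if_neg hc, if_neg hc]
      exact ih t (fun x hx => hs x (by simp [hx])) ht

-- A's outer loop over range(1, m+1) fills the table with the recurrence's values V.
lemma outer_fold_generic {α : Type} (steps : List Int) (hs : ∀ s ∈ steps, 1 ≤ s)
    (N : Nat) (op : α → α → Int → α) (d : α) (V : Int → α)
    (hrec : ∀ i : Int, 1 ≤ i → i ≤ (N : Int) →
      steps.foldl (fun a s => if i - s ≥ 0 then op a (V (i - s)) s else a) d = V i) :
    ∀ m : Nat, m ≤ N →
    (PySem.List.pyRange 1 ((m : Int) + 1) 1).foldl (fun t i =>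
        steps.foldl (fun t s =>
          if i - s ≥ 0 then
            PySem.List.pySetD t i (op (PySem.List.pyGetD t i d)
              (PySem.List.pyGetD t (i - s) d) s)
          else t) t)
      ((List.range (N + 1)).map (fun j => if j = 0 then V 0 else d))
    = (List.range (N + 1)).map (fun j => if j ≤ m then V (j : Int) else d) := by
  intro m
  induction m with
  | zero =>
    intro _
    rw [PySem.List.pyRange_one_eq_nil (by omega)]
    simp only [List.foldl_nil]
    refine List.map_congr_left (fun j hj => ?_)
    rcases Nat.eq_zero_or_pos j with h0 | h0
    · subst h0; simp
    · rw [if_neg (by omega), if_neg (by omega)]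
  | succ m ih =>
    intro hm
    have hm' : m ≤ N := by omega
    have hsplit : PySem.List.pyRange 1 (((m + 1 : Nat) : Int) + 1) 1
        = PySem.List.pyRange 1 ((m : Int) + 1) 1 ++ [((m + 1 : Nat) : Int)] := by
      push_cast
      exact PySem.List.pyRange_one_succ_right (by omega)
    rw [hsplit, List.foldl_append, ih hm']
    set Tm := (List.range (N + 1)).map (fun j => if j ≤ m then V (j : Int) else d) with hTm
    simp only [List.foldl_cons, List.foldl_nil]
    have hlen : (m + 1) < Tm.length := by simp [hTm]; omega
    have := inner_fold_generic op d (m + 1) steps Tm hs hlen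
    rw [this]
    have hgd : Tm.getD (m + 1) d = d := by
      rw [hTm, PySem.List.getD_map_range _ _ _ _ (by omega), if_neg (by omega)]
    have hread : ∀ s : Int, 1 ≤ s → ((m + 1 : Nat) : Int) - s ≥ 0 →
        PySem.List.pyGetD Tm (((m + 1 : Nat) : Int) - s) d = V (((m + 1 : Nat) : Int) - s) := by
      intro s hs1 hc
      have hk : ((m + 1 : Nat) : Int) - s = (((m + 1) - s.toNat : Nat) : Int) := by omega
      rw [hk, PySem.List.pyGetD_natCast, hTm,
        PySem.List.getD_map_range _ _ _ _ (by omega), if_pos (by omega)]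
    have hfold : Tm.set (m + 1) (steps.foldl (fun a s =>
          if ((m + 1 : Nat) : Int) - s ≥ 0 then
            op a (PySem.List.pyGetD Tm (((m + 1 : Nat) : Int) - s) d) s else a)
          (Tm.getD (m + 1) d))
        = Tm.set (m + 1) (V ((m + 1 : Nat) : Int)) := by
      congr 1
      rw [hgd]
      rw [PySem.List.foldl_congr_mem steps _ (fun a s =>
        if ((m + 1 : Nat) : Int) - s ≥ 0 then op a (V (((m + 1 : Nat) : Int) - s)) s else a) d
        (fun a s hsm => by
          beta_reduce
          by_cases hc : ((m + 1 : Nat) : Int) - s ≥ 0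
          · rw [if_pos hc, if_pos hc, hread s (hs s hsm) hc]
          · rw [if_neg hc, if_neg hc])]
      exact hrec ((m + 1 : Nat) : Int) (by omega) (by omega)
    rw [hfold]
    apply List.ext_getElem
    · simp [hTm]
    · intro k hk1 hk2
      simp only [hTm, List.getElem_set, List.getElem_map, List.getElem_range] at *
      by_cases hkm : m + 1 = k
      · rw [if_pos hkm, hkm, if_pos (by omega)]
      · rw [if_neg hkm]
        by_cases hle : k ≤ m
        · rw [if_pos hle, if_pos (by omega)]
        · rw [if_neg hle, if_neg (by omega)]

-- The path recurrence of A's second loop is satisfied by B's recursion.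
lemma hrec_paths (steps : List Int) (hs : ∀ s ∈ steps, 1 ≤ s) (N : Nat) (i : Int)
    (h1 : 1 ≤ i) (hN : i ≤ (N : Int)) :
    steps.foldl (fun a s => if i - s ≥ 0 then
        a ++ (altWaysTo steps N (i - s)).map (fun p => p ++ [s]) else a) []
      = altWaysTo steps N i := by
  rw [PySem.List.foldl_congr_mem steps _ (fun a s =>
      a ++ (if i - s ≥ 0 then (altWaysTo steps N (i - s)).map (fun p => p ++ [s]) else []))
      [] (fun a s _ => by
        beta_reduce
        by_cases hc : i - s ≥ 0
        · rw [if_pos hc, if_pos hc]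
        · rw [if_neg hc, if_neg hc, List.append_nil])]
  rw [PySem.List.foldl_append_eq_flatMap, List.nil_append]
  exact (altWaysTo_unfold steps hs N i h1 hN).symm

-- The count recurrence of A's first loop is satisfied by the lengths of B's path lists.
lemma hrec_counts (steps : List Int) (hs : ∀ s ∈ steps, 1 ≤ s) (N : Nat) (i : Int)
    (h1 : 1 ≤ i) (hN : i ≤ (N : Int)) :
    steps.foldl (fun a s => if i - s ≥ 0 then
        a + ((altWaysTo steps N (i - s)).length : Int) else a) 0
      = ((altWaysTo steps N i).length : Int) := by
  rw [PySem.List.foldl_congr_mem steps _ (fun a s =>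
      a + (if i - s ≥ 0 then ((altWaysTo steps N (i - s)).length : Int) else 0))
      0 (fun a s _ => by
        beta_reduce
        by_cases hc : i - s ≥ 0
        · rw [if_pos hc, if_pos hc]
        · rw [if_neg hc, if_neg hc, Int.add_zero])]
  rw [PySem.List.foldl_add, zero_add]
  rw [altWaysTo_unfold steps hs N i h1 hN, List.length_flatMap]
  push_cast
  congr 1
  rw [List.map_map]
  refine List.map_congr_left (fun s _ => ?_)
  by_cases hc : i - s ≥ 0
  · simp only [Function.comp_apply, if_pos hc, List.length_map]
  · simp only [Function.comp_apply, if_neg hc, List.length_nil, Nat.cast_zero]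

lemma init_table {α : Type} (N : Nat) (x y : α) :
    (List.replicate (N + 1) x).set 0 y
      = (List.range (N + 1)).map (fun j => if j = 0 then y else x) := by
  apply List.ext_getElem
  · simp
  · intro k hk1 hk2
    simp only [List.getElem_set, List.getElem_replicate, List.getElem_map, List.getElem_range]
    by_cases h0 : 0 = k
    · rw [if_pos h0, if_pos h0.symm]
    · rw [if_neg h0, if_neg (fun h => h0 h.symm)]

-- ===== VERDICT (by name: the statement is the Claim_ definition above) =====
lemma pySetD_zero {α : Type} (xs : List α) (v : α) :
    PySem.List.pySetD xs (0 : Int) v = xs.set 0 v := by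
  rw [show (0 : Int) = ((0 : Nat) : Int) from by norm_num, PySem.List.pySetD_natCast]

theorem nonRecursiveStaircase_spec : Claim_equal_nonRecursiveStaircase := by
  unfold Claim_equal_nonRecursiveStaircase
  intro n steps _ hpre
  obtain ⟨hn0, hcase⟩ := hpre
  unfold Spec_nonRecursiveStaircase
  rcases hcase with hn | hs
  · -- n = 0: both loops run over the empty range
    subst hn
    simp only [nonRecursiveStaircase, nonRecursiveStaircase_alt]
    rw [show (0 : Int) + 1 = 1 from by norm_num,
      PySem.List.pyRange_one_eq_nil (le_refl (1 : Int))]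
    simp [pySetD_zero, altWaysTo_zero]
  · -- general case: run the table invariants up to N = n.toNat
    have hnN : n = (n.toNat : Int) := (Int.toNat_of_nonneg hn0).symm
    set N := n.toNat with hN
    have hO1 := outer_fold_generic steps hs N (fun a r _ => a + r) (0 : Int)
        (fun j => ((altWaysTo steps N j).length : Int))
        (fun i h1 h2 => hrec_counts steps hs N i h1 h2) N le_rfl
    have hO2 := outer_fold_generic steps hs N (fun a r s => a ++ r.map (fun p => p ++ [s]))
        ([] : List (List Int)) (fun j => altWaysTo steps N j)
        (fun i h1 h2 => hrec_paths steps hs N i h1 h2) N le_rfl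
    beta_reduce at hO1 hO2
    simp only [nonRecursiveStaircase, nonRecursiveStaircase_alt]
    rw [show (n + 1).toNat = N + 1 from by omega,
      show n + 1 = (N : Int) + 1 from by omega,
      pySetD_zero, pySetD_zero, init_table, init_table]
    rw [show (fun j => if j = 0 then (1 : Int) else 0)
        = (fun j => if j = 0 then ((altWaysTo steps N (0 : Int)).length : Int) else 0) from by
      funext j; simp [altWaysTo_zero]]
    rw [show (fun j => if j = 0 then [([] : List Int)] else [])
        = (fun j => if j = 0 then altWaysTo steps N (0 : Int) else []) from by
      funext j; simp [altWaysTo_zero]]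
    rw [hO1, hO2, hnN,
      PySem.List.pyGetD_natCast, PySem.List.pyGetD_natCast,
      PySem.List.getD_map_range _ _ _ _ (by omega), PySem.List.getD_map_range _ _ _ _ (by omega),
      if_pos (le_refl N), if_pos (le_refl N), Int.toNat_natCast]
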